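-- pv_equiv track=rewrite | github.com/rehan-shafi/exam_scheduler_streamlit | app/scheduler.py | _course_violation_weight
-- ===== SOURCE A (Python) =====
-- def _build_slot_day_maps(day_slots):
--     """
--     day_slots: list of even slot ids in the exact day order being used (e.g., [0,10,2,12,...])
--     Returns:
--       slot_to_day: dict[slot] -> day_index
--       day_to_slot: dict[day_index] -> slot
--     """
--     slot_to_day = {s: d for d, s in enumerate(day_slots)}
--     day_to_slot = {d: s for d, s in enumerate(day_slots)}
--     return slot_to_day, day_to_slot
--
-- def _triples_from_slots_order_aware(slots_set, slot_to_day, num_days):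
--     """
--     Convert a set of slots -> day indices using slot_to_day, then return all (d,d+1,d+2) windows present.
--     """
--     day_idxs = sorted({slot_to_day[s] for s in slots_set if s in slot_to_day})
--     dayset = set(day_idxs)
--     triples = []
--     for d in range(num_days - 2):
--         if d in dayset and (d+1) in dayset and (d+2) in dayset:
--             triples.append((d, d+1, d+2))
--     return triples
--
-- def _course_violation_weight(course, student_slots, student_courses_by_slot, day_slots):
--     slot_to_day, _ = _build_slot_day_maps(day_slots)
--     num_days = len(day_slots)
--     count = 0
--     for stu, slots in student_slots.items():
--         triples = _triples_from_slots_order_aware(slots, slot_to_day, num_days)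
--         if not triples:
--             continue
--         for (d0, d1, d2) in triples:
--             # translate back to slots for membership check
--             s0 = day_slots[d0]; s1 = day_slots[d1]; s2 = day_slots[d2]
--             if course in student_courses_by_slot.get(stu, {}).get(s0, []):
--                 count += 1; continue
--             if course in student_courses_by_slot.get(stu, {}).get(s1, []):
--                 count += 1; continue
--             if course in student_courses_by_slot.get(stu, {}).get(s2, []):
--                 count += 1; continue
--     return count
-- ===== SOURCE B (Python) =====
-- def _course_violation_weight(course, student_slots, student_courses_by_slot, day_slots):
--     # Streaming run-length counter: one pass over the day sequence per student with O(1)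
--     # state, no triple lists and no sorting. A window of 3 consecutive present days is
--     # counted at its END day: +1 when the trailing run of present days reaches >= 3,
--     # -1 when the trailing run of present-but-course-free days reaches >= 3, so the net
--     # contribution is exactly "all three present and at least one carries the course".
--     slot_to_day = {s: d for d, s in enumerate(day_slots)}
--     total = 0
--     for stu, slots in student_slots.items():
--         dayset = {slot_to_day[s] for s in slots if s in slot_to_day}
--         by_slot = student_courses_by_slot.get(stu, {})
--         run = 0   # length of trailing run of present days
--         bad = 0   # length of trailing run of present days without the course
--         for d, s in enumerate(day_slots):
--             if d in dayset:
--                 run += 1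
--                 if course in by_slot.get(s, []):
--                     bad = 0
--                 else:
--                     bad += 1
--             else:
--                 run = 0
--                 bad = 0
--             if run >= 3:
--                 total += 1
--             if bad >= 3:
--                 total -= 1
--     return total
-- ===== Notes on version B (the rewrite author's own statement) =====
-- stated objective: alternative
-- what changed: B replaces A's per-student pipeline (build a sorted set of day indices, materialize the list of all 3-day windows, translate each window back to slots and scan its course lists) by a streaming run-length counter: one pass over the day sequence keeping two O(1) counters (trailing run of present days, trailing run of present-but-course-free days), adding 1 when the first reaches 3 and subtracting 1 when the second does, which counts exactly the windows that are fully present and carry at least one occurrence of the course.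
import Mathlib
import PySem

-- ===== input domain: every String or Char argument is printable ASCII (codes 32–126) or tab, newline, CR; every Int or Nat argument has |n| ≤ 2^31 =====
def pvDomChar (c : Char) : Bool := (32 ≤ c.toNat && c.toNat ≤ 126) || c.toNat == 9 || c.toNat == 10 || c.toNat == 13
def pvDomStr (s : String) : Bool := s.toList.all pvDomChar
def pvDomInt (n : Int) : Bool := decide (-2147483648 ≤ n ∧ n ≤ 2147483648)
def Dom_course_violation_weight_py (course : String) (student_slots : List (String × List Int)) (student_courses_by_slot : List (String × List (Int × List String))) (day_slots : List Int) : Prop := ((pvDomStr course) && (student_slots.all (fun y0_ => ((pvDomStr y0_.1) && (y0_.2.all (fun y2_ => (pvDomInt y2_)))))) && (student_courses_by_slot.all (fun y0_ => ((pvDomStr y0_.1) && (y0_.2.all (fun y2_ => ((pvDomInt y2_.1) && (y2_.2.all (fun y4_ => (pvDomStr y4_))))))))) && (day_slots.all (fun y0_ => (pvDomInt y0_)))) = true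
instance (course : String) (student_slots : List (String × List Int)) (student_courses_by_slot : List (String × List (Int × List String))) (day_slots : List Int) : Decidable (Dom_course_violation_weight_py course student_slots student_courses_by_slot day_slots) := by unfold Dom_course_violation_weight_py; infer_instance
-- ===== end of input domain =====

-- B replaces A's per-student triple-list construction (sorted day set, window list, slot translation)
-- by a streaming run-length counter over the day sequence (objective: alternative algorithm; equal return value proved below).

-- ===== PORT A =====
-- _build_slot_day_maps: slot_to_day = {s: d for d, s in enumerate(day_slots)}; day_to_slot = {d: s …}
def cvwA_build_slot_day_maps (day_slots : List Int) : PySem.Dict Int Int × PySem.Dict Int Int :=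
  ((PySem.List.enumerate day_slots).foldl (fun m p => m.insert p.2 p.1) PySem.Dict.empty,
   (PySem.List.enumerate day_slots).foldl (fun m p => m.insert p.1 p.2) PySem.Dict.empty)

-- _triples_from_slots_order_aware (slots_set is consumed only into a set: order-independent)
def cvwA_triples (slots_set : List Int) (slot_to_day : PySem.Dict Int Int) (num_days : Int) :
    List (Int × Int × Int) :=
  let day_idxs : List Int :=
    PySem.List.sorted
      (slots_set.foldl
        (fun a s => if slot_to_day.contains s
                    -- slot_to_day[s]: the key is present under the guard, so the default is never used
                    then PySem.Set.add a (slot_to_day.getD s 0) else a)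
        PySem.Set.empty)
      (fun x => x) false
  let dayset : PySem.Set Int := PySem.Set.ofList day_idxs
  (PySem.List.pyRange 0 (num_days - 2)).foldl
    (fun acc d =>
      if dayset.contains d && dayset.contains (d + 1) && dayset.contains (d + 2)
      then acc ++ [(d, d + 1, d + 2)] else acc) []

def course_violation_weight_py (course : String) (student_slots : List (String × List Int)) (student_courses_by_slot : List (String × List (Int × List String))) (day_slots : List Int) : Int :=
  let slot_to_day := (cvwA_build_slot_day_maps day_slots).1
  let num_days : Int := day_slots.length
  student_slots.foldl
    (fun count p =>
      let triples := cvwA_triples p.2 slot_to_day num_days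
      if triples.isEmpty then count
      else
        triples.foldl
          (fun c t =>
            -- day_slots[d]: every triple component is in range(num_days), so the default is never used
            let s0 := PySem.List.pyGetD day_slots t.1 0
            let s1 := PySem.List.pyGetD day_slots t.2.1 0
            let s2 := PySem.List.pyGetD day_slots t.2.2 0
            let bys := PySem.Dict.getD (PySem.Dict.mk student_courses_by_slot) p.1 []
            if ((PySem.Dict.mk bys).getD s0 []).contains course then c + 1
            else if ((PySem.Dict.mk bys).getD s1 []).contains course then c + 1
            else if ((PySem.Dict.mk bys).getD s2 []).contains course then c + 1
            else c)
          count)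
    0

-- ===== PORT B =====
-- streaming run-length counter: per student one pass over enumerate(day_slots) with state
-- (run, bad, total); +1 when the trailing present-run reaches 3, -1 when the trailing
-- present-and-course-free run reaches 3
def course_violation_weight_py_alt (course : String) (student_slots : List (String × List Int)) (student_courses_by_slot : List (String × List (Int × List String))) (day_slots : List Int) : Int :=
  let slot_to_day :=
    (PySem.List.enumerate day_slots).foldl (fun m p => m.insert p.2 p.1) PySem.Dict.empty
  student_slots.foldl
    (fun total p =>
      -- dayset = {slot_to_day[s] for s in slots if s in slot_to_day}; key present under the guard
      let dayset : PySem.Set Int :=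
        p.2.foldl
          (fun a s => if slot_to_day.contains s
                      then PySem.Set.add a (slot_to_day.getD s 0) else a)
          PySem.Set.empty
      let by_slot := PySem.Dict.getD (PySem.Dict.mk student_courses_by_slot) p.1 []
      ((PySem.List.enumerate day_slots).foldl
        (fun (st : Int × Int × Int) q =>
          let run := if dayset.contains q.1 then st.1 + 1 else 0
          let bad := if dayset.contains q.1 then
                       (if ((PySem.Dict.mk by_slot).getD q.2 []).contains course then 0
                        else st.2.1 + 1)
                     else 0
          let t1 := if run ≥ 3 then st.2.2 + 1 else st.2.2
          let t2 := if bad ≥ 3 then t1 - 1 else t1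
          (run, bad, t2))
        (0, 0, total)).2.2)
    0

-- ===== PRECONDITION & SPEC =====
def Spec_course_violation_weight_py (course : String) (student_slots : List (String × List Int)) (student_courses_by_slot : List (String × List (Int × List String))) (day_slots : List Int) (out : Int) : Prop := out = course_violation_weight_py_alt course student_slots student_courses_by_slot day_slots
instance (course : String) (student_slots : List (String × List Int)) (student_courses_by_slot : List (String × List (Int × List String))) (day_slots : List Int) (out : Int) : Decidable (Spec_course_violation_weight_py course student_slots student_courses_by_slot day_slots out) := by unfold Spec_course_violation_weight_py; infer_instance

-- ===== CLAIM (what is proved, stated in full; the proofs are below) =====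
def Claim_equal_course_violation_weight_py : Prop := ∀ (course : String) (student_slots : List (String × List Int)) (student_courses_by_slot : List (String × List (Int × List String))) (day_slots : List Int), Dom_course_violation_weight_py course student_slots student_courses_by_slot day_slots → Spec_course_violation_weight_py course student_slots student_courses_by_slot day_slots (course_violation_weight_py course student_slots student_courses_by_slot day_slots)

-- ===== LEMMAS AND PROOFS =====

-- the slot→day dict both sources build with {s: d for d, s in enumerate(day_slots)}
def cvwS2D (day_slots : List Int) : PySem.Dict Int Int :=
  (PySem.List.enumerate day_slots).foldl (fun m p => m.insert p.2 p.1) PySem.Dict.empty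

-- the day-index set {slot_to_day[s] for s in slots if s in slot_to_day} both sources build
def cvwDaySet (slot_to_day : PySem.Dict Int Int) (slots : List Int) : PySem.Set Int :=
  slots.foldl
    (fun a s => if slot_to_day.contains s then PySem.Set.add a (slot_to_day.getD s 0) else a)
    PySem.Set.empty

-- per-day booleans of one student: day k present / course taught on day k's slot
def cvwPres (slot_to_day : PySem.Dict Int Int) (slots : List Int) (k : Nat) : Bool :=
  PySem.Set.contains (cvwDaySet slot_to_day slots) (k : Int)

def cvwHc (course : String) (by_slot : List (Int × List String)) (day_slots : List Int) (k : Nat) : Bool :=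
  ((PySem.Dict.mk by_slot).getD (day_slots.getD k 0) []).contains course

-- length of the trailing run of days < n satisfying p
def cvwR (p : Nat → Bool) : Nat → Int
  | 0 => 0
  | k + 1 => if p k then cvwR p k + 1 else 0

-- number of 3-windows of p-days with at least one h-day, among days < n
def cvwW (p h : Nat → Bool) (n : Nat) : Int :=
  ((List.range (n - 2)).countP
    (fun k => p k && p (k + 1) && p (k + 2) && (h k || h (k + 1) || h (k + 2))) : Int)

-- B's loop body, abstracted over the two per-day booleans
def cvwStep (p h : Bool) (st : Int × Int × Int) : Int × Int × Int :=
  let run := if p then st.1 + 1 else 0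
  let bad := if p then (if h then 0 else st.2.1 + 1) else 0
  let t1 := if run ≥ 3 then st.2.2 + 1 else st.2.2
  let t2 := if bad ≥ 3 then t1 - 1 else t1
  (run, bad, t2)

lemma cvwR_nonneg (p : Nat → Bool) (n : Nat) : 0 ≤ cvwR p n := by
  induction n with
  | zero => simp [cvwR]
  | succ m ih => simp only [cvwR]; split <;> omega

lemma cvwR_le (p : Nat → Bool) (n : Nat) : cvwR p n ≤ (n : Int) := by
  induction n with
  | zero => simp [cvwR]
  | succ m ih => simp only [cvwR]; split <;> push_cast <;> omega

lemma cvwR_ge1 (p : Nat → Bool) (k : Nat) : 3 ≤ cvwR p (k + 1) + 2 ↔ p k = true := by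
  have h0 := cvwR_nonneg p k
  rw [show cvwR p (k + 1) = if p k = true then cvwR p k + 1 else 0 from rfl]
  rcases Bool.eq_false_or_eq_true (p k) with hp | hp
  · simp [hp]
    omega
  · simp [hp]

lemma cvwR_ge2 (p : Nat → Bool) (k : Nat) :
    3 ≤ cvwR p (k + 2) + 1 ↔ p (k + 1) = true ∧ p k = true := by
  have h1 := cvwR_ge1 p k
  rw [show cvwR p (k + 2) = if p (k + 1) = true then cvwR p (k + 1) + 1 else 0 from rfl]
  rcases Bool.eq_false_or_eq_true (p (k + 1)) with hp | hp
  · simp [hp]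
    rw [← h1]
    omega
  · simp [hp]

lemma cvwR_ge3 (p : Nat → Bool) (k : Nat) :
    3 ≤ cvwR p (k + 3) ↔ p (k + 2) = true ∧ p (k + 1) = true ∧ p k = true := by
  have h2 := cvwR_ge2 p k
  rw [show cvwR p (k + 3) = if p (k + 2) = true then cvwR p (k + 2) + 1 else 0 from rfl]
  rcases Bool.eq_false_or_eq_true (p (k + 2)) with hp | hp
  · simp [hp]
    exact h2
  · simp [hp]

-- the nested elif chain of A, fused with the outer window test, is one combined test
lemma cvw_if_chain (P0 P1 P2 c0 c1 c2 : Bool) (c : Int) :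
    (if P0 && P1 && P2
     then (if c0 then c + 1 else if c1 then c + 1 else if c2 then c + 1 else c)
     else c)
      = if P0 && P1 && P2 && (c0 || c1 || c2) then c + 1 else c := by
  cases P0 <;> cases P1 <;> cases P2 <;> cases c0 <;> cases c1 <;> cases c2 <;> simp

-- the streaming loop computes the two trailing-run lengths and the window count
lemma cvw_stream (p h : Nat → Bool) (n : Nat) (t0 : Int) :
    (List.range n).foldl (fun st k => cvwStep (p k) (h k) st) (0, 0, t0)
      = (cvwR p n, cvwR (fun k => p k && !h k) n, t0 + cvwW p h n) := by
  induction n with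
  | zero => simp [cvwR, cvwW]
  | succ m ih =>
    rw [List.range_succ, List.foldl_append, ih]
    simp only [List.foldl_cons, List.foldl_nil]
    have hrun : (if p m = true then cvwR p m + 1 else 0) = cvwR p (m + 1) := by
      simp only [cvwR]
    have hbad : (if p m = true then (if h m = true then 0 else cvwR (fun k => p k && !h k) m + 1)
          else 0) = cvwR (fun k => p k && !h k) (m + 1) := by
      rcases Bool.eq_false_or_eq_true (p m) with hp | hp <;>
        rcases Bool.eq_false_or_eq_true (h m) with hh | hh <;> simp [cvwR, hp, hh]
    simp only [cvwStep, hrun, hbad]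
    refine Prod.ext rfl (Prod.ext rfl ?_)
    show (if cvwR (fun k => p k && !h k) (m + 1) ≥ 3
          then (if cvwR p (m + 1) ≥ 3 then t0 + cvwW p h m + 1 else t0 + cvwW p h m) - 1
          else (if cvwR p (m + 1) ≥ 3 then t0 + cvwW p h m + 1 else t0 + cvwW p h m))
        = t0 + cvwW p h (m + 1)
    have hl1 := cvwR_le p (m + 1)
    have hl2 := cvwR_le (fun k => p k && !h k) (m + 1)
    rcases m with _ | _ | m'
    · rw [if_neg (by omega), if_neg (by omega)]
      simp [cvwW]
    · rw [if_neg (by omega), if_neg (by omega)]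
      simp [cvwW]
    · clear hl1 hl2
      simp only [show m' + 1 + 1 + 1 = m' + 3 from rfl, show m' + 1 + 1 = m' + 2 from rfl]
      have hW : cvwW p h (m' + 3) = cvwW p h (m' + 2)
          + (if (p m' && p (m' + 1) && p (m' + 2)
                 && (h m' || h (m' + 1) || h (m' + 2))) = true then 1 else 0) := by
        simp only [cvwW, show m' + 3 - 2 = m' + 1 from rfl, show m' + 2 - 2 = m' from rfl,
          List.range_succ, List.countP_append, List.countP_cons, List.countP_nil]
        split <;> push_cast <;> ring
      rw [hW]
      have hp3 := cvwR_ge3 p m'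
      have hq3 := cvwR_ge3 (fun k => p k && !h k) m'
      simp only [] at hq3
      by_cases hP : 3 ≤ cvwR p (m' + 3)
      · rw [if_pos (show cvwR p (m' + 3) ≥ 3 from hP)]
        obtain ⟨e2, e1, e0⟩ := hp3.mp hP
        by_cases hQ : 3 ≤ cvwR (fun k => p k && !h k) (m' + 3)
        · rw [if_pos (show cvwR (fun k => p k && !h k) (m' + 3) ≥ 3 from hQ)]
          obtain ⟨f2, f1, f0⟩ := hq3.mp hQ
          have h0 : h m' = false := by revert f0; cases h m' <;> simp
          have h1 : h (m' + 1) = false := by revert f1; cases h (m' + 1) <;> simp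
          have h2 : h (m' + 2) = false := by revert f2; cases h (m' + 2) <;> simp
          rw [if_neg (by simp [h0, h1, h2])]
          ring
        · rw [if_neg (fun hc => hQ hc)]
          have hor : (h m' || h (m' + 1) || h (m' + 2)) = true := by
            by_contra hc
            exact hQ (hq3.mpr (by
              revert hc; cases h m' <;> cases h (m' + 1) <;> cases h (m' + 2) <;>
                simp [e0, e1, e2]))
          rw [if_pos (by simp [e0, e1, e2, hor])]
          ring
      · rw [if_neg (fun hc => hP hc)]
        have hQ : ¬ 3 ≤ cvwR (fun k => p k && !h k) (m' + 3) := by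
          intro hQ
          obtain ⟨f2, f1, f0⟩ := hq3.mp hQ
          exact hP (hp3.mpr ⟨by revert f2; cases p (m' + 2) <;> simp,
            by revert f1; cases p (m' + 1) <;> simp,
            by revert f0; cases p m' <;> simp⟩)
        rw [if_neg (fun hc => hQ hc)]
        have hand : ¬ ((p m' && p (m' + 1) && p (m' + 2)
            && (h m' || h (m' + 1) || h (m' + 2))) = true) := by
          intro hc
          refine hP (hp3.mpr ?_)
          revert hc
          cases p m' <;> cases p (m' + 1) <;> cases p (m' + 2) <;> simp
        rw [if_neg hand]
        ring

-- A's dayset (sorted then re-setted) has the same membership test as the raw fold set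
lemma cvw_contains_sorted (l : List Int) (x : Int) :
    PySem.Set.contains (PySem.Set.ofList (PySem.List.sorted l (fun y => y) false)) x
      = l.contains x := by
  rw [Bool.eq_iff_iff, List.contains_iff_mem]
  simp [PySem.Set.contains, PySem.Set.mem_ofList, PySem.List.mem_sorted]

lemma cvw_if_isEmpty_foldl {α β : Type} (t : List α) (f : β → α → β) (acc : β) :
    (if t.isEmpty then acc else t.foldl f acc) = t.foldl f acc := by
  cases t <;> simp

-- A's per-student contribution is acc + (window count)
lemma cvwA_student (course : String) (scbs : List (String × List (Int × List String)))
    (day_slots slots : List Int) (stu : String) (acc : Int) :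
    (let triples := cvwA_triples slots (cvwS2D day_slots) (day_slots.length : Int)
     if triples.isEmpty then acc
     else
       triples.foldl
         (fun c t =>
           let s0 := PySem.List.pyGetD day_slots t.1 0
           let s1 := PySem.List.pyGetD day_slots t.2.1 0
           let s2 := PySem.List.pyGetD day_slots t.2.2 0
           let bys := PySem.Dict.getD (PySem.Dict.mk scbs) stu []
           if ((PySem.Dict.mk bys).getD s0 []).contains course then c + 1
           else if ((PySem.Dict.mk bys).getD s1 []).contains course then c + 1
           else if ((PySem.Dict.mk bys).getD s2 []).contains course then c + 1
           else c)
         acc)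
      = acc + cvwW (cvwPres (cvwS2D day_slots) slots)
          (cvwHc course (PySem.Dict.getD (PySem.Dict.mk scbs) stu []) day_slots)
          day_slots.length := by
  rw [cvw_if_isEmpty_foldl]
  unfold cvwA_triples
  simp only []
  rw [PySem.List.foldl_append_if, List.nil_append, List.foldl_map,
    ← PySem.List.foldl_if_eq_foldl_filter, PySem.List.pyRange_one, List.foldl_map]
  have hlen : ((day_slots.length : Int) - 2 - 0).toNat = day_slots.length - 2 := by omega
  rw [hlen]
  trans ((List.range (day_slots.length - 2)).foldl
    (fun c k => if (cvwPres (cvwS2D day_slots) slots k && cvwPres (cvwS2D day_slots) slots (k + 1)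
        && cvwPres (cvwS2D day_slots) slots (k + 2)
        && (cvwHc course (PySem.Dict.getD (PySem.Dict.mk scbs) stu []) day_slots k
            || cvwHc course (PySem.Dict.getD (PySem.Dict.mk scbs) stu []) day_slots (k + 1)
            || cvwHc course (PySem.Dict.getD (PySem.Dict.mk scbs) stu []) day_slots (k + 2)))
        = true then c + 1 else c) acc)
  · apply PySem.List.foldl_congr_mem
    intro c k hk
    have e0 : (0 : Int) + (k : Int) = ((k : Nat) : Int) := by ring
    have e1 : (0 : Int) + (k : Int) + 1 = ((k + 1 : Nat) : Int) := by push_cast; ring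
    have e2 : (0 : Int) + (k : Int) + 2 = ((k + 2 : Nat) : Int) := by push_cast; ring
    rw [e1, e2, e0]
    simp only [cvw_contains_sorted, PySem.List.pyGetD_natCast]
    rw [cvw_if_chain]
    simp only [cvwPres, cvwHc, cvwDaySet]
    rfl
  · rw [PySem.List.foldl_if_add_one]
    rfl

-- B's per-student contribution is the same window count
lemma cvwB_student (course : String) (scbs : List (String × List (Int × List String)))
    (day_slots slots : List Int) (stu : String) (acc : Int) :
    ((PySem.List.enumerate day_slots).foldl
        (fun (st : Int × Int × Int) q =>
          let run := if PySem.Set.contains (cvwDaySet (cvwS2D day_slots) slots) q.1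
                     then st.1 + 1 else 0
          let bad := if PySem.Set.contains (cvwDaySet (cvwS2D day_slots) slots) q.1 then
                       (if ((PySem.Dict.mk (PySem.Dict.getD (PySem.Dict.mk scbs) stu [])).getD
                              q.2 []).contains course then 0
                        else st.2.1 + 1)
                     else 0
          let t1 := if run ≥ 3 then st.2.2 + 1 else st.2.2
          let t2 := if bad ≥ 3 then t1 - 1 else t1
          (run, bad, t2))
        (0, 0, acc)).2.2
      = acc + cvwW (cvwPres (cvwS2D day_slots) slots)
          (cvwHc course (PySem.Dict.getD (PySem.Dict.mk scbs) stu []) day_slots)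
          day_slots.length := by
  rw [PySem.List.enumerate_eq_map_pyRange day_slots 0, List.foldl_map]
  rw [PySem.List.pyRange_one]
  rw [List.foldl_map]
  have hlen : ((PySem.List.len day_slots : Int) - 0).toNat = day_slots.length := by
    simp [PySem.List.len_eq]
  rw [hlen]
  trans ((List.range day_slots.length).foldl
      (fun st k => cvwStep (cvwPres (cvwS2D day_slots) slots k)
        (cvwHc course (PySem.Dict.getD (PySem.Dict.mk scbs) stu []) day_slots k) st)
      (0, 0, acc)).2.2
  · refine congrArg (fun z : Int × Int × Int => z.2.2) ?_
    apply PySem.List.foldl_congr_mem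
    intro st k hk
    have e0 : (0 : Int) + (k : Int) = ((k : Nat) : Int) := by ring
    simp only [e0, PySem.List.pyGetD_natCast]
    rfl
  · rw [cvw_stream]

-- ===== VERDICT (by name: the statement is the Claim_ definition above) =====
theorem course_violation_weight_py_spec : Claim_equal_course_violation_weight_py := by
  intro course student_slots student_courses_by_slot day_slots _
  unfold Spec_course_violation_weight_py
  simp only [course_violation_weight_py, course_violation_weight_py_alt,
    cvwA_build_slot_day_maps]
  have hS : (PySem.List.enumerate day_slots).foldl
      (fun m p => m.insert p.2 p.1) PySem.Dict.empty = cvwS2D day_slots := rfl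
  rw [hS]
  apply PySem.List.foldl_congr_mem
  intro acc p _
  exact (cvwA_student course student_courses_by_slot day_slots p.2 p.1 acc).trans
    (cvwB_student course student_courses_by_slot day_slots p.2 p.1 acc).symm
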